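-- pv_equiv track=rewrite | github.com/FranckDubray/dragonfly-mcp-server | src/tools/_py_orchestrator/validation_core.py | _unique_labels_per_sg
-- ===== SOURCE A (Python) =====
-- from typing import Dict, Any, List, Tuple, Optional
--
-- def _unique_labels_per_sg(graph: Dict[str, Any]) -> Tuple[bool, List[str]]:
--     nodes = graph.get("nodes", [])
--     seen: Dict[str, set] = {}
--     errors: List[str] = []
--     for n in nodes:
--         if n.get("type") in {"start", "end"}:
--             continue
--         sg = n.get("subgraph") or "__ROOT__"
--         nm = str(n.get("name"))
--         s = seen.setdefault(sg, set())
--         if nm in s: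
--             errors.append(f"Duplicate step/cond name in subgraph '{sg}': {nm}")
--         else:
--             s.add(nm)
--     return (len(errors) == 0, errors)
-- ===== SOURCE B (Python) =====
-- from typing import Dict, Any, List, Tuple
--
-- def _unique_labels_per_sg(graph: Dict[str, Any]) -> Tuple[bool, List[str]]:
--     # Naive prefix rescan: a node is a duplicate iff an earlier kept node
--     # has the same subgraph and name. No seen-structure is maintained.
--     nodes = graph.get("nodes", [])
--     errors: List[str] = []
--     for i, n in enumerate(nodes):
--         if n.get("type") in {"start", "end"}:
--             continue
--         sg = n.get("subgraph") or "__ROOT__"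
--         nm = str(n.get("name"))
--         if any(m.get("type") not in {"start", "end"}
--                and (m.get("subgraph") or "__ROOT__") == sg
--                and str(m.get("name")) == nm
--                for m in nodes[:i]):
--             errors.append(f"Duplicate step/cond name in subgraph '{sg}': {nm}")
--     return (len(errors) == 0, errors)
-- ===== Notes on version B (the rewrite author's own statement) =====
-- stated objective: alternative
-- what changed: Replaces A's per-subgraph dict of seen-name sets with a stateless naive rescan: each kept node is checked for a duplicate by scanning the earlier nodes directly, so no seen-structure is maintained.
import Mathlib
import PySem

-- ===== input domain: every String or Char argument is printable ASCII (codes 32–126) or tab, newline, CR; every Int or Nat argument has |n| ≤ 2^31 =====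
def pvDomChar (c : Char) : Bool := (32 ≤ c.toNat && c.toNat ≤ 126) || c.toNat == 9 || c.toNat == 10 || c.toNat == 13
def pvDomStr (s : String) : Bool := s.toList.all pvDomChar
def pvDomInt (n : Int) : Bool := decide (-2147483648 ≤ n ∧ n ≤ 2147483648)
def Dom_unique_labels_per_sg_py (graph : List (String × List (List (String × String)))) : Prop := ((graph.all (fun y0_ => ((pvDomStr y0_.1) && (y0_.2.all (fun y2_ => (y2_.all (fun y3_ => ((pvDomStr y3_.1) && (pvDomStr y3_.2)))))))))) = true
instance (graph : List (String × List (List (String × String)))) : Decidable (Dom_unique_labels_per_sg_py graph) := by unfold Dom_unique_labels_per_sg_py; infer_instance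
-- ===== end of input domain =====

-- B replaces A's dict-of-sets single pass by a naive rescan of the prefix of earlier nodes (alternative decomposition, same results).

-- shared attribute extraction (same in both Pythons)
def pvSkip (n : List (String × String)) : Bool :=
  (PySem.Dict.get? (PySem.Dict.mk n) "type" == some "start") || (PySem.Dict.get? (PySem.Dict.mk n) "type" == some "end")
def pvNodeSg (n : List (String × String)) : String :=
  match PySem.Dict.get? (PySem.Dict.mk n) "subgraph" with
  | some s => if s == "" then "__ROOT__" else s
  | none => "__ROOT__"
def pvNodeNm (n : List (String × String)) : String :=
  match PySem.Dict.get? (PySem.Dict.mk n) "name" with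
  | some s => s
  | none => "None"
def pvErr (sg nm : String) : String :=
  "Duplicate step/cond name in subgraph '" ++ sg ++ "': " ++ nm

-- ===== PORT A =====
def pvStepA (st : PySem.Dict String (PySem.Set String) × List String)
    (n : List (String × String)) : PySem.Dict String (PySem.Set String) × List String :=
  if pvSkip n then st else
  let sg := pvNodeSg n
  let nm := pvNodeNm n
  let seen := PySem.Dict.setdefault st.1 sg PySem.Set.empty
  let s := PySem.Dict.getD seen sg PySem.Set.empty
  if PySem.Set.contains s nm then (seen, st.2 ++ [pvErr sg nm])
  else (PySem.Dict.insert seen sg (PySem.Set.add s nm), st.2)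

def unique_labels_per_sg_py (graph : List (String × List (List (String × String)))) : Bool × List String :=
  let nodes := (PySem.Dict.get? (PySem.Dict.mk graph) "nodes").getD []
  let res := nodes.foldl pvStepA (PySem.Dict.empty, [])
  (res.2.length == 0, res.2)

-- ===== PORT B =====
-- is some earlier kept node (in pre) a duplicate of (sg, nm)?
def pvDupIn (pre : List (List (String × String))) (sg nm : String) : Bool :=
  pre.any (fun m => !pvSkip m && (pvNodeSg m == sg) && (pvNodeNm m == nm))

-- walk the nodes keeping the already-visited prefix, emitting an error per rediscovered key
def pvGoB : List (List (String × String)) → List (List (String × String)) → List String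
  | _, [] => []
  | pre, n :: rest =>
    (if !pvSkip n && pvDupIn pre (pvNodeSg n) (pvNodeNm n)
       then [pvErr (pvNodeSg n) (pvNodeNm n)] else [])
      ++ pvGoB (pre ++ [n]) rest

def unique_labels_per_sg_py_alt (graph : List (String × List (List (String × String)))) : Bool × List String :=
  let nodes := (PySem.Dict.get? (PySem.Dict.mk graph) "nodes").getD []
  let errors := pvGoB [] nodes
  (errors.length == 0, errors)

-- ===== PRECONDITION & SPEC =====
def Spec_unique_labels_per_sg_py (graph : List (String × List (List (String × String)))) (out : Bool × List String) : Prop := out = unique_labels_per_sg_py_alt graph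
instance (graph : List (String × List (List (String × String)))) (out : Bool × List String) : Decidable (Spec_unique_labels_per_sg_py graph out) := by unfold Spec_unique_labels_per_sg_py; infer_instance

-- ===== CLAIM (what is proved, stated in full; the proofs are below) =====
def Claim_equal_unique_labels_per_sg_py : Prop := ∀ (graph : List (String × List (List (String × String)))), Dom_unique_labels_per_sg_py graph → Spec_unique_labels_per_sg_py graph (unique_labels_per_sg_py graph)

-- ===== LEMMAS AND PROOFS =====

theorem pvGetD_setdefault_of_ne {ν : Type} (d : PySem.Dict String ν) (k k' : String) (v d0 : ν)
    (h : k' ≠ k) : PySem.Dict.getD (PySem.Dict.setdefault d k v) k' d0 = PySem.Dict.getD d k' d0 := by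
  rw [PySem.Dict.getD_eq_get?_getD, PySem.Dict.get?_setdefault_of_ne d v h,
    ← PySem.Dict.getD_eq_get?_getD]

theorem pvStepA_skip (st : PySem.Dict String (PySem.Set String) × List String)
    (n : List (String × String)) (hsk : pvSkip n = true) : pvStepA st n = st := by
  simp [pvStepA, hsk]

theorem pvStepA_dup (seen : PySem.Dict String (PySem.Set String)) (errs : List String)
    (n : List (String × String)) (hsk : pvSkip n = false)
    (hc : PySem.Set.contains (PySem.Dict.getD seen (pvNodeSg n) PySem.Set.empty) (pvNodeNm n) = true) :
    pvStepA (seen, errs) n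
      = (PySem.Dict.setdefault seen (pvNodeSg n) PySem.Set.empty,
         errs ++ [pvErr (pvNodeSg n) (pvNodeNm n)]) := by
  have hc' : pvNodeNm n ∈ PySem.Dict.getD seen (pvNodeSg n) ([] : PySem.Set String) :=
    (PySem.Set.contains_iff _ _).mp hc
  simp [pvStepA, hsk, PySem.Dict.getD_setdefault_self, hc']

theorem pvStepA_new (seen : PySem.Dict String (PySem.Set String)) (errs : List String)
    (n : List (String × String)) (hsk : pvSkip n = false)
    (hc : PySem.Set.contains (PySem.Dict.getD seen (pvNodeSg n) PySem.Set.empty) (pvNodeNm n) = false) :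
    pvStepA (seen, errs) n
      = (PySem.Dict.insert (PySem.Dict.setdefault seen (pvNodeSg n) PySem.Set.empty) (pvNodeSg n)
           (PySem.Set.add (PySem.Dict.getD seen (pvNodeSg n) PySem.Set.empty) (pvNodeNm n)),
         errs) := by
  have hc' : pvNodeNm n ∉ PySem.Dict.getD seen (pvNodeSg n) ([] : PySem.Set String) := by
    intro hm
    have : PySem.Set.contains (PySem.Dict.getD seen (pvNodeSg n) PySem.Set.empty) (pvNodeNm n) = true :=
      (PySem.Set.contains_iff _ _).mpr hm
    rw [this] at hc
    exact absurd hc (by simp)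
  simp [pvStepA, hsk, PySem.Dict.getD_setdefault_self, hc']

-- invariant: the set stored under sg in A's dict holds exactly the names of kept prefix nodes in subgraph sg
def pvInv (seen : PySem.Dict String (PySem.Set String)) (pre : List (List (String × String))) : Prop :=
  ∀ sg nm, PySem.Set.contains (PySem.Dict.getD seen sg PySem.Set.empty) nm = pvDupIn pre sg nm

theorem pvDupIn_append (pre : List (List (String × String))) (n : List (String × String))
    (sg nm : String) :
    pvDupIn (pre ++ [n]) sg nm
      = (pvDupIn pre sg nm || (!pvSkip n && (pvNodeSg n == sg) && (pvNodeNm n == nm))) := by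
  simp [pvDupIn]

theorem pvInv_empty : pvInv PySem.Dict.empty [] := by
  intro sg nm
  simp [pvDupIn, PySem.Dict.getD_empty, PySem.Set.empty, PySem.Set.contains]

theorem pvInv_step (seen : PySem.Dict String (PySem.Set String))
    (pre : List (List (String × String))) (n : List (String × String))
    (h : pvInv seen pre) : pvInv (pvStepA (seen, []) n).1 (pre ++ [n]) := by
  intro sg nm
  cases hsk : pvSkip n with
  | true =>
    rw [pvStepA_skip _ _ hsk, pvDupIn_append, h sg nm, hsk]
    simp
  | false =>
    cases hc : PySem.Set.contains (PySem.Dict.getD seen (pvNodeSg n) PySem.Set.empty) (pvNodeNm n) with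
    | true =>
      rw [pvStepA_dup seen [] n hsk hc, pvDupIn_append]
      by_cases hsg : sg = pvNodeSg n
      · subst hsg
        rw [PySem.Dict.getD_setdefault_self, h _ nm]
        by_cases hnm : pvNodeNm n = nm
        · have hd : pvDupIn pre (pvNodeSg n) nm = true := by rw [← hnm, ← h _ _]; exact hc
          simp [hd]
        · simp [hsk, hnm]
      · rw [pvGetD_setdefault_of_ne _ _ _ _ _ hsg, h sg nm]
        have hne : (pvNodeSg n == sg) = false := by
          exact beq_eq_false_iff_ne.mpr (fun e => hsg e.symm)
        simp [hne]
    | false =>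
      rw [pvStepA_new seen [] n hsk hc, pvDupIn_append]
      by_cases hsg : sg = pvNodeSg n
      · subst hsg
        rw [PySem.Dict.getD_insert, if_pos rfl, Bool.eq_iff_iff]
        simp only [PySem.Set.contains_iff, PySem.Set.mem_add, Bool.or_eq_true, Bool.and_eq_true,
          Bool.not_eq_eq_eq_not, Bool.not_true, beq_iff_eq, beq_self_eq_true, and_true]
        constructor
        · rintro (hmem | hnm)
          · left
            rw [← h (pvNodeSg n) nm, (PySem.Set.contains_iff _ _).mpr hmem]
          · exact Or.inr ⟨hsk, hnm.symm⟩
        · rintro (hdup | ⟨_, hnm⟩)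
          · left
            rw [← PySem.Set.contains_iff, h (pvNodeSg n) nm]
            exact hdup
          · exact Or.inr hnm.symm
      · rw [PySem.Dict.getD_insert, if_neg hsg, pvGetD_setdefault_of_ne _ _ _ _ _ hsg, h sg nm]
        have hne : (pvNodeSg n == sg) = false := by
          exact beq_eq_false_iff_ne.mpr (fun e => hsg e.symm)
        simp [hne]

theorem pvFold_eq (rest : List (List (String × String))) :
    ∀ (pre : List (List (String × String))) (seen : PySem.Dict String (PySem.Set String))
      (errs : List String), pvInv seen pre →
      (rest.foldl pvStepA (seen, errs)).2 = errs ++ pvGoB pre rest := by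
  induction rest with
  | nil => intro pre seen errs _; simp [pvGoB]
  | cons n rest ih =>
    intro pre seen errs hinv
    have hstep1 : (pvStepA (seen, errs) n).1 = (pvStepA (seen, []) n).1 := by
      cases hsk : pvSkip n with
      | true => rw [pvStepA_skip _ _ hsk, pvStepA_skip _ _ hsk]
      | false =>
        cases hc : PySem.Set.contains (PySem.Dict.getD seen (pvNodeSg n) PySem.Set.empty) (pvNodeNm n) with
        | true => rw [pvStepA_dup _ _ _ hsk hc, pvStepA_dup _ _ _ hsk hc]
        | false => rw [pvStepA_new _ _ _ hsk hc, pvStepA_new _ _ _ hsk hc]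
    have hinv' : pvInv (pvStepA (seen, errs) n).1 (pre ++ [n]) := by
      rw [hstep1]; exact pvInv_step seen pre n hinv
    have hstep2 : (pvStepA (seen, errs) n).2
        = errs ++ (if !pvSkip n && pvDupIn pre (pvNodeSg n) (pvNodeNm n)
            then [pvErr (pvNodeSg n) (pvNodeNm n)] else []) := by
      cases hsk : pvSkip n with
      | true =>
        rw [pvStepA_skip _ _ hsk]
        simp
      | false =>
        cases hc : PySem.Set.contains (PySem.Dict.getD seen (pvNodeSg n) PySem.Set.empty) (pvNodeNm n) with
        | true =>
          rw [pvStepA_dup _ _ _ hsk hc]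
          have hd : pvDupIn pre (pvNodeSg n) (pvNodeNm n) = true := by rw [← hinv _ _, hc]
          simp [hd]
        | false =>
          rw [pvStepA_new _ _ _ hsk hc]
          have hd : pvDupIn pre (pvNodeSg n) (pvNodeNm n) = false := by rw [← hinv _ _, hc]
          simp [hd]
    have hrest : (List.foldl pvStepA (pvStepA (seen, errs) n) rest).2
        = (pvStepA (seen, errs) n).2 ++ pvGoB (pre ++ [n]) rest := by
      have := ih (pre ++ [n]) (pvStepA (seen, errs) n).1 (pvStepA (seen, errs) n).2 hinv'
      simpa using this
    rw [List.foldl_cons, hrest, hstep2, pvGoB, List.append_assoc]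

-- ===== VERDICT (by name: the statement is the Claim_ definition above) =====
theorem unique_labels_per_sg_py_spec : Claim_equal_unique_labels_per_sg_py := by
  intro graph _
  unfold Spec_unique_labels_per_sg_py unique_labels_per_sg_py unique_labels_per_sg_py_alt
  have := pvFold_eq ((PySem.Dict.get? (PySem.Dict.mk graph) "nodes").getD []) [] PySem.Dict.empty [] pvInv_empty
  simp only [List.nil_append] at this
  simp [this]
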